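-- pv_equiv track=rewrite | github.com/Synthesis/ray2get | ray2get.py | encode_init
-- ===== SOURCE A (Python) =====
-- step_table = [
--     0x0007, 0x0008, 0x0009, 0x000a, 0x000b, 0x000c, 0x000d, 0x000e,
--     0x0010, 0x0011, 0x0013, 0x0015, 0x0017, 0x0019, 0x001c, 0x001f,
--     0x0022, 0x0025, 0x0029, 0x002d, 0x0032, 0x0037, 0x003c, 0x0042,
--     0x0049, 0x0050, 0x0058, 0x0061, 0x006b, 0x0076, 0x0082, 0x008f,
--     0x009d, 0x00ad, 0x00be, 0x00d1, 0x00e6, 0x00fd, 0x0117, 0x0133,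
--     0x0151, 0x0173, 0x0198, 0x01c1, 0x01ee, 0x0220, 0x0256, 0x0292,
--     0x02d4, 0x031c, 0x036c, 0x03c3, 0x0424, 0x048e, 0x0502, 0x0583,
--     0x0610, 0x06ab, 0x0756, 0x0812, 0x08e0, 0x09c3, 0x0abd, 0x0bd0,
--     0x0cff, 0x0e4c, 0x0fba, 0x114c, 0x1307, 0x14ee, 0x1706, 0x1954,
--     0x1bdc, 0x1ea5, 0x21b6, 0x2515, 0x28ca, 0x2cdf, 0x315b, 0x364b,
--     0x3bb9, 0x41b2, 0x4844, 0x4f7e, 0x5771, 0x602f, 0x69ce, 0x7462,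
--     0x7fff
-- ]
--
-- def encode_init(sample1, sample2):
--     """
--         Initialize the ADPCM encoding, using the first two PCM samples of the
--         audio signal.
--
--         See http://www.cs.columbia.edu/~hgs/audio/dvi/ for more information.
--     """
--     predictor = sample1
--     diff = sample2 - sample1
--
--     if diff < 0:
--         diff = -diff
--     elif diff > 32767:
--         diff = 32767
--     stepindex = 0
--     while step_table[stepindex] < diff:
--         stepindex += 1
--
--     return predictor, stepindex
-- ===== SOURCE B (Python) =====
-- import bisect
--
-- # ADPCM step-size table (same values as the original, written in decimal).
-- step_table = [7, 8, 9, 10, 11, 12, 13, 14, 16, 17, 19, 21, 23, 25, 28, 31,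
--     34, 37, 41, 45, 50, 55, 60, 66, 73, 80, 88, 97, 107, 118, 130, 143, 157,
--     173, 190, 209, 230, 253, 279, 307, 337, 371, 408, 449, 494, 544, 598, 658,
--     724, 796, 876, 963, 1060, 1166, 1282, 1411, 1552, 1707, 1878, 2066, 2272,
--     2499, 2749, 3024, 3327, 3660, 4026, 4428, 4871, 5358, 5894, 6484, 7132,
--     7845, 8630, 9493, 10442, 11487, 12635, 13899, 15289, 16818, 18500, 20350,
--     22385, 24623, 27086, 29794, 32767]
--
-- def encode_init(sample1, sample2):
--     # Clamp the magnitude of the difference, then binary-search the sorted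
--     # step table for the first entry >= diff instead of scanning linearly.
--     diff = min(abs(sample2 - sample1), 32767)
--     return sample1, bisect.bisect_left(step_table, diff)
-- ===== Notes on version B (the rewrite author's own statement) =====
-- stated objective: idiomatic
-- what changed: The hand-written linear scan of step_table for the first entry >= diff is replaced by min/abs clamping plus a binary search (bisect.bisect_left) over the sorted table; the table position is located by halving the range instead of walking it.
import Mathlib
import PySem

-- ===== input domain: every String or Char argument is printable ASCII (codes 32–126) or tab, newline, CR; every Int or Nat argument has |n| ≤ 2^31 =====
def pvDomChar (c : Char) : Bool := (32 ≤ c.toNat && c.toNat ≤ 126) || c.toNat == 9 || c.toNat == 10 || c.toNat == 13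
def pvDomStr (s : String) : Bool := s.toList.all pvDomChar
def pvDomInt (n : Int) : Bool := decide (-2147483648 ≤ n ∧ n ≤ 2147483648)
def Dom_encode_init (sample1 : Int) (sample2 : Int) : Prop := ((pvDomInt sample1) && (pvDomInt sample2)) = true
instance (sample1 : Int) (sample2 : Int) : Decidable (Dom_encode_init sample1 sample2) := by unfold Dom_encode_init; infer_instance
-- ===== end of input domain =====

-- B replaces A's linear scan of step_table by min/abs clamping plus a bisect_left binary search over the sorted table (idiomatic; return value equal on Pre_).


-- ===== PORT A =====
def stepTable : List Int := [
  0x0007, 0x0008, 0x0009, 0x000a, 0x000b, 0x000c, 0x000d, 0x000e,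
  0x0010, 0x0011, 0x0013, 0x0015, 0x0017, 0x0019, 0x001c, 0x001f,
  0x0022, 0x0025, 0x0029, 0x002d, 0x0032, 0x0037, 0x003c, 0x0042,
  0x0049, 0x0050, 0x0058, 0x0061, 0x006b, 0x0076, 0x0082, 0x008f,
  0x009d, 0x00ad, 0x00be, 0x00d1, 0x00e6, 0x00fd, 0x0117, 0x0133,
  0x0151, 0x0173, 0x0198, 0x01c1, 0x01ee, 0x0220, 0x0256, 0x0292,
  0x02d4, 0x031c, 0x036c, 0x03c3, 0x0424, 0x048e, 0x0502, 0x0583,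
  0x0610, 0x06ab, 0x0756, 0x0812, 0x08e0, 0x09c3, 0x0abd, 0x0bd0,
  0x0cff, 0x0e4c, 0x0fba, 0x114c, 0x1307, 0x14ee, 0x1706, 0x1954,
  0x1bdc, 0x1ea5, 0x21b6, 0x2515, 0x28ca, 0x2cdf, 0x315b, 0x364b,
  0x3bb9, 0x41b2, 0x4844, 0x4f7e, 0x5771, 0x602f, 0x69ce, 0x7462,
  0x7fff]

-- A's 'while step_table[stepindex] < diff: stepindex += 1' as a scan down the table,
-- carrying the current index.  Python raises IndexError when the scan runs off the
-- table; those inputs are excluded by Pre_encode_init (the [] case is unreachable there).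
def aScan (diff : Int) : List Int → Int → Int
  | [], i => i
  | v :: rest, i => if v < diff then aScan diff rest (i + 1) else i

def encode_init (sample1 : Int) (sample2 : Int) : Int × Int :=
  let predictor := sample1
  let diff := sample2 - sample1
  let diff := if diff < 0 then -diff else if diff > 32767 then 32767 else diff
  (predictor, aScan diff stepTable 0)

-- ===== PORT B =====
-- Source B's step_table, written in decimal exactly as there.
def bStepTable : List Int := [7, 8, 9, 10, 11, 12, 13, 14, 16, 17, 19, 21, 23, 25, 28, 31,
  34, 37, 41, 45, 50, 55, 60, 66, 73, 80, 88, 97, 107, 118, 130, 143, 157,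
  173, 190, 209, 230, 253, 279, 307, 337, 371, 408, 449, 494, 544, 598, 658,
  724, 796, 876, 963, 1060, 1166, 1282, 1411, 1552, 1707, 1878, 2066, 2272,
  2499, 2749, 3024, 3327, 3660, 4026, 4428, 4871, 5358, 5894, 6484, 7132,
  7845, 8630, 9493, 10442, 11487, 12635, 13899, 15289, 16818, 18500, 20350,
  22385, 24623, 27086, 29794, 32767]

-- Hand port of bisect.bisect_left(step_table, x) (lo = 0, hi = len = 89): exact —
-- every probed index mid satisfies 0 ≤ lo ≤ mid < hi ≤ 89, so getD mid.toNat is in range.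
def bisectLeft (x lo hi : Int) : Int :=
  if h : lo < hi then
    let mid := PySem.Int.floordiv (lo + hi) 2
    if bStepTable.getD mid.toNat 0 < x then bisectLeft x (mid + 1) hi
    else bisectLeft x lo mid
  else lo
termination_by (hi - lo).toNat
decreasing_by
  · have := PySem.Int.floordiv_two_mid_bounds (le_of_lt h)
    omega
  · have h2 : (0:Int) < 2 := by omega
    have := (PySem.Int.floordiv_lt_iff_lt_mul (a := lo + hi) (b := 2) (q := hi) h2).mpr (by omega)
    have := (PySem.Int.floordiv_two_mid_bounds (le_of_lt h)).1
    omega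

def encode_init_alt (sample1 : Int) (sample2 : Int) : Int × Int :=
  let diff := min |sample2 - sample1| 32767
  (sample1, bisectLeft diff 0 89)

-- ===== PRECONDITION & SPEC =====
-- Pre_ excludes exactly the inputs where A raises IndexError: when sample1 - sample2 > 32767
-- the negated diff escapes the elif clamp and the scan runs off the end of step_table.
def Pre_encode_init (sample1 : Int) (sample2 : Int) : Prop := sample1 - sample2 ≤ 32767
instance (sample1 : Int) (sample2 : Int) : Decidable (Pre_encode_init sample1 sample2) := by unfold Pre_encode_init; infer_instance
def pvWitness_encode_init : Int × Int := (0, 100)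

def Spec_encode_init (sample1 : Int) (sample2 : Int) (out : Int × Int) : Prop := out = encode_init_alt sample1 sample2
instance (sample1 : Int) (sample2 : Int) (out : Int × Int) : Decidable (Spec_encode_init sample1 sample2 out) := by unfold Spec_encode_init; infer_instance

-- ===== CLAIM (what is proved, stated in full; the proofs are below) =====
def Claim_equal_encode_init : Prop := ∀ (sample1 : Int) (sample2 : Int), Dom_encode_init sample1 sample2 → Pre_encode_init sample1 sample2 → Spec_encode_init sample1 sample2 (encode_init sample1 sample2)

-- ===== LEMMAS AND PROOFS =====

theorem bStepTable_eq : bStepTable = stepTable := by decide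

-- step_table is sorted (nondecreasing).
theorem stepTable_sorted : stepTable.Pairwise (· ≤ ·) := by decide

theorem stepTable_len : stepTable.length = 89 := by decide

theorem stepTable_mono {i j : Nat} (hij : i ≤ j) (hj : j < 89) :
    stepTable.getD i 0 ≤ stepTable.getD j 0 := by
  rcases eq_or_lt_of_le hij with rfl | hlt
  · exact le_refl _
  · have hj' : j < stepTable.length := by rw [stepTable_len]; exact hj
    have hi' : i < stepTable.length := lt_of_le_of_lt hij hj'
    rw [List.getD_eq_getElem stepTable 0 hi', List.getD_eq_getElem stepTable 0 hj']
    exact (List.pairwise_iff_getElem.mp stepTable_sorted) i j hi' hj' hlt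

-- "k is the first index with stepTable[k] ≥ d", as a boundary property.
def FirstIdx (d k : Int) : Prop :=
  0 ≤ k ∧ k ≤ 89 ∧ (∀ j : Nat, (j : Int) < k → stepTable.getD j 0 < d) ∧
    (k < 89 → d ≤ stepTable.getD k.toNat 0)

theorem firstIdx_unique {d k1 k2 : Int} (h1 : FirstIdx d k1) (h2 : FirstIdx d k2)
    (hd : d ≤ 32767) : k1 = k2 := by
  obtain ⟨h10, h189, h1lt, h1ge⟩ := h1
  obtain ⟨h20, h289, h2lt, h2ge⟩ := h2
  have hne : ∀ k : Int, 0 ≤ k → k ≤ 89 →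
      (∀ j : Nat, (j : Int) < k → stepTable.getD j 0 < d) → k < 89 := by
    intro k hk0 hk89 hklt
    by_contra hc
    have := hklt 88 (by omega)
    have h88 : stepTable.getD 88 0 = 32767 := by decide
    omega
  have h1lt89 := hne k1 h10 h189 h1lt
  have h2lt89 := hne k2 h20 h289 h2lt
  by_contra hne2
  rcases lt_or_gt_of_ne hne2 with hlt | hlt
  · have := h2lt k1.toNat (by omega)
    have := h1ge h1lt89
    omega
  · have := h1lt k2.toNat (by omega)
    have := h2ge h2lt89
    omega

-- A's scan, started at position k on the k-th suffix of the table with everything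
-- before k known to be < d, yields a FirstIdx.
theorem aScan_firstIdx (d : Int) : ∀ (n k : Nat), 89 - k = n → k ≤ 89 →
    (∀ j : Nat, j < k → stepTable.getD j 0 < d) →
    FirstIdx d (aScan d (stepTable.drop k) (k : Int)) := by
  intro n
  induction n with
  | zero =>
    intro k hn hk hlt
    have hk89 : k = 89 := by omega
    subst hk89
    have hdrop : stepTable.drop 89 = [] := by decide
    rw [hdrop]
    simp only [aScan]
    refine ⟨by positivity, by norm_num, ?_, by intro h; exact absurd h (by norm_num)⟩
    intro j hj
    exact hlt j (by exact_mod_cast hj)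
  | succ m ih =>
    intro k hn hk hlt
    have hk89 : k < 89 := by omega
    have hkl : k < stepTable.length := by rw [stepTable_len]; exact hk89
    rw [List.drop_eq_getElem_cons hkl]
    rw [aScan]
    by_cases hc : stepTable[k] < d
    · simp only [hc, if_pos]
      have hx : ((k : Int) + 1) = ((k + 1 : Nat) : Int) := by push_cast; ring
      rw [hx]
      refine ih (k + 1) (by omega) (by omega) ?_
      intro j hj
      rcases Nat.lt_succ_iff_lt_or_eq.mp hj with hj' | hj'
      · exact hlt j hj'
      · subst hj'
        rw [List.getD_eq_getElem stepTable 0 hkl]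
        exact hc
    · simp only [hc, if_neg, not_false_iff]
      refine ⟨by positivity, by omega, ?_, ?_⟩
      · intro j hj
        exact hlt j (by exact_mod_cast hj)
      · intro _
        have : ((k : Int)).toNat = k := by omega
        rw [this, List.getD_eq_getElem stepTable 0 hkl]
        omega

-- bisectLeft invariant: entries before lo are < d, entries from hi on are ≥ d.
theorem bisectLeft_firstIdx (d : Int) : ∀ (n : Nat) (lo hi : Int), (hi - lo).toNat = n →
    0 ≤ lo → lo ≤ hi → hi ≤ 89 →
    (∀ j : Nat, (j : Int) < lo → stepTable.getD j 0 < d) →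
    (∀ j : Nat, hi ≤ (j : Int) → j < 89 → d ≤ stepTable.getD j 0) →
    FirstIdx d (bisectLeft d lo hi) := by
  intro n
  induction n using Nat.strong_induction_on with
  | _ n ih =>
    intro lo hi hn h0 hle h89 hlo hhi
    rw [bisectLeft]
    by_cases h : lo < hi
    · simp only [h, dif_pos, bStepTable_eq]
      set mid := PySem.Int.floordiv (lo + hi) 2 with hmid
      have hb := PySem.Int.floordiv_two_mid_bounds (le_of_lt h)
      have hmlt : PySem.Int.floordiv (lo + hi) 2 < hi := by
        have h2 : (0:Int) < 2 := by omega
        exact (PySem.Int.floordiv_lt_iff_lt_mul (a := lo + hi) (b := 2) (q := hi) h2).mpr (by omega)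
      rw [← hmid] at hb hmlt
      by_cases hc : stepTable.getD mid.toNat 0 < d
      · simp only [hc, if_pos]
        refine ih (hi - (mid + 1)).toNat (by omega) (mid + 1) hi (by omega) (by omega)
          (by omega) h89 ?_ hhi
        intro j hj
        by_cases hjlo : (j : Int) < lo
        · exact hlo j hjlo
        · have : j ≤ mid.toNat := by omega
          exact lt_of_le_of_lt (stepTable_mono this (by omega)) hc
      · simp only [hc, if_neg, not_false_iff]
        refine ih (mid - lo).toNat (by omega) lo mid (by omega) h0 (by omega) (by omega) hlo ?_
        intro j hj hj89
        have : mid.toNat ≤ j := by omega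
        have hm := stepTable_mono this hj89
        omega
    · simp only [h, dif_neg, not_false_iff]
      have hlohi : lo = hi := by omega
      refine ⟨h0, by omega, hlo, ?_⟩
      intro hlt
      exact hhi lo.toNat (by omega) (by omega)

-- ===== VERDICT (by name: the statement is the Claim_ definition above) =====
theorem encode_init_spec : Claim_equal_encode_init := by
  intro s1 s2 _ hpre
  unfold Spec_encode_init encode_init encode_init_alt
  simp only
  set d0 := s2 - s1 with hd0
  have hpre' : -32767 ≤ d0 := by
    unfold Pre_encode_init at hpre; omega
  have habs : |d0| = if d0 < 0 then -d0 else d0 := by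
    split_ifs with hneg
    · exact abs_of_neg hneg
    · exact abs_of_nonneg (by omega)
  -- on Pre_, A's clamped diff equals B's min(|d0|, 32767)
  have hdiff : (if d0 < 0 then -d0 else if d0 > 32767 then 32767 else d0)
      = min |d0| 32767 := by
    rw [habs, min_def]
    split_ifs <;> omega
  rw [hdiff]
  set d := min |d0| 32767 with hd
  have hd32 : d ≤ 32767 := by rw [hd]; exact min_le_right _ _
  have hA : FirstIdx d (aScan d stepTable 0) := by
    have := aScan_firstIdx d 89 0 rfl (by omega) (by omega)
    simpa using this
  have hB : FirstIdx d (bisectLeft d 0 89) := by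
    refine bisectLeft_firstIdx d 89 0 89 (by omega) (by omega) (by omega) (by omega) ?_ ?_
    · intro j hj
      omega
    · intro j hj hj89
      omega
  rw [firstIdx_unique hA hB hd32]
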